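-- pv_equiv track=rewrite | github.com/YoannaYotova/Python101 | week02/reduce_file_path.py | removing_double_slash
-- ===== SOURCE A (Python) =====
-- def removing_double_slash(path):
--     reduced_file_path = ""
--     if len(path) == 0:
--         raise ValueError('Invalid path')
--
--     for i in range(0, len(path) - 1):
--         if path[i] != path[i + 1] or path[i] != "/":
--             reduced_file_path += "".join(path[i])
--
--     reduced_file_path = reduced_file_path + path[-1]
--     return reduced_file_path
-- ===== SOURCE B (Python) =====
-- from itertools import groupby
--
--
-- def removing_double_slash(path):
--     if len(path) == 0:
--         raise ValueError('Invalid path')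
--     return ''.join('/' if ch == '/' else ''.join(g) for ch, g in groupby(path))
-- ===== Notes on version B (the rewrite author's own statement) =====
-- stated objective: idiomatic
-- what changed: Replaced the index-with-lookahead character loop by an itertools.groupby segmentation: each run of characters is emitted whole, with slash runs collapsed to a single '/'.
import Mathlib
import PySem

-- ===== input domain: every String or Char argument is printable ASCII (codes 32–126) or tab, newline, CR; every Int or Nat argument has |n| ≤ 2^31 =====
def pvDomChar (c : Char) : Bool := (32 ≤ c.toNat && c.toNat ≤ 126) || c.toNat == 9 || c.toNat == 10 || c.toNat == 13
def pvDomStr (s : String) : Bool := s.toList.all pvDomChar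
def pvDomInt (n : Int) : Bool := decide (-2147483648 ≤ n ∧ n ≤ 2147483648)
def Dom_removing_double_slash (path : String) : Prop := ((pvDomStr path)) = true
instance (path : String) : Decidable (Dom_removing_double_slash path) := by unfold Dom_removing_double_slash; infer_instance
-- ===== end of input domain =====

-- B replaces A's index-with-lookahead loop by a run-segmentation (itertools.groupby): idiomatic, same result.

-- ===== PORT A =====
-- A's for-loop over i in range(0, len-1) comparing path[i] with path[i+1]: pairwise recursion;
-- the final singleton case is the 'reduced_file_path + path[-1]' step.
def pvLoopA : List Char → List Char
  | [] => []
  | [c] => [c]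
  | a :: b :: rest =>
      (if a ≠ b ∨ a ≠ '/' then [a] else []) ++ pvLoopA (b :: rest)

-- A raises ValueError on the empty path (excluded by Pre_); "" here is a placeholder outside Pre_.
def removing_double_slash (path : String) : String :=
  if path.length = 0 then "" else String.ofList (pvLoopA path.toList)

-- ===== PORT B =====
-- groupby: peel one maximal run at a time; a slash run yields one '/', any other run is kept whole.
def pvLoopB : List Char → List Char
  | [] => []
  | c :: rest =>
      (if c = '/' then ['/'] else c :: rest.takeWhile (· == c)) ++
        pvLoopB (rest.dropWhile (· == c))
termination_by cs => cs.length
decreasing_by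
  simpa using Nat.lt_succ_of_le (List.length_dropWhile_le (· == c) rest)

def removing_double_slash_alt (path : String) : String :=
  if path.length = 0 then "" else String.ofList (pvLoopB path.toList)

-- ===== PRECONDITION & SPEC =====
-- A raises ValueError on the empty string; Pre_ excludes exactly that input.
def Pre_removing_double_slash (path : String) : Prop := path ≠ ""
instance (path : String) : Decidable (Pre_removing_double_slash path) := by
  unfold Pre_removing_double_slash; infer_instance
def pvWitness_removing_double_slash : String := "a//b"

def Spec_removing_double_slash (path : String) (out : String) : Prop := out = removing_double_slash_alt path
instance (path : String) (out : String) : Decidable (Spec_removing_double_slash path out) := by unfold Spec_removing_double_slash; infer_instance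

-- ===== CLAIM (what is proved, stated in full; the proofs are below) =====
def Claim_equal_removing_double_slash : Prop := ∀ (path : String), Dom_removing_double_slash path → Pre_removing_double_slash path → Spec_removing_double_slash path (removing_double_slash path)

-- ===== LEMMAS AND PROOFS =====

theorem pvLoopB_nonslash (c : Char) (hc : c ≠ '/') (rest : List Char) :
    pvLoopB (c :: rest) = c :: pvLoopB rest := by
  cases rest with
  | nil => simp [pvLoopB, hc]
  | cons b rest2 =>
      by_cases hb : b = c
      · subst hb
        rw [pvLoopB, pvLoopB]
        simp [hc, List.takeWhile, List.dropWhile]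
      · have hbc : (b == c) = false := by simp [hb]
        rw [pvLoopB]
        simp [hc, List.takeWhile, List.dropWhile, hbc]

theorem pvLoopB_slash (rest : List Char) :
    pvLoopB ('/' :: rest) = '/' :: pvLoopB (rest.dropWhile (· == '/')) := by
  rw [pvLoopB]; simp

theorem pvLoop_eq : ∀ cs : List Char, cs ≠ [] → pvLoopA cs = pvLoopB cs := by
  intro cs
  induction cs using pvLoopA.induct with
  | case1 => intro h; exact absurd rfl h
  | case2 c =>
      intro _
      by_cases hc : c = '/'
      · subst hc; simp [pvLoopA, pvLoopB]
      · simp [pvLoopA, pvLoopB, hc]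
  | case3 a b rest ih =>
      intro _
      by_cases ha : a = '/'
      · subst ha
        by_cases hb : b = '/'
        · subst hb
          have : pvLoopA ('/' :: '/' :: rest) = pvLoopA ('/' :: rest) := by
            simp [pvLoopA]
          rw [this, ih (by simp), pvLoopB_slash, pvLoopB_slash]
          simp [List.dropWhile]
        · have : pvLoopA ('/' :: b :: rest) = '/' :: pvLoopA (b :: rest) := by
            simp [pvLoopA, Ne.symm hb]
          have hbs : (b == '/') = false := by simp [hb]
          rw [this, ih (by simp), pvLoopB_slash]
          simp [List.dropWhile, hbs]
      · have : pvLoopA (a :: b :: rest) = a :: pvLoopA (b :: rest) := by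
          simp [pvLoopA, ha]
        rw [this, ih (by simp), pvLoopB_nonslash a ha]

-- ===== VERDICT (by name: the statement is the Claim_ definition above) =====
theorem removing_double_slash_spec : Claim_equal_removing_double_slash := by
  intro path _ hpre
  unfold Pre_removing_double_slash at hpre
  unfold Spec_removing_double_slash removing_double_slash removing_double_slash_alt
  have hne : path.toList ≠ [] := by
    simp [String.toList_eq_nil_iff, hpre]
  have hlen : path.length ≠ 0 := by
    rw [← String.length_toList]; simpa using hne
  simp [hlen, pvLoop_eq _ hne]
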